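-- pv_equiv track=rewrite | github.com/NikVeak/Cutting | service.py | linear_cutting
-- ===== SOURCE A (Python) =====
-- def linear_cutting(length, cut_lengths, cut_counts):
--     def generate_cuts(length, cut_lengths, cut_counts, current_cut, result, remainders):
--         if not cut_lengths:
--             result.append(current_cut.copy() + cut_counts)
--             remainders.append(length)
--             return
--
--         for i in range(min(length // cut_lengths[0], cut_counts[0]) + 1):
--             generate_cuts(length - i * cut_lengths[0], cut_lengths[1:], cut_counts[1:], current_cut + [i], result,
--                           remainders)
--
--     result = []
--     remainders = []
--     generate_cuts(length, cut_lengths, cut_counts, [], result, remainders)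
--     return result, remainders
-- ===== SOURCE B (Python) =====
-- def linear_cutting(length, cut_lengths, cut_counts):
--     # Level-wise enumeration: expand a list of (prefix, remaining-length) states
--     # one dimension at a time instead of recursive backtracking.
--     states = [([], length)]
--     for L, c in zip(cut_lengths, cut_counts):
--         states = [(p + [i], r - i * L)
--                   for (p, r) in states
--                   for i in range(min(r // L, c) + 1)]
--     tail = cut_counts[len(cut_lengths):]
--     return [p + tail for (p, r) in states], [r for (p, r) in states]
-- ===== Notes on version B (the rewrite author's own statement) =====
-- stated objective: idiomatic
-- what changed: Replaces the recursive backtracking with mutated result lists by a level-wise (breadth-first) expansion: a flat list of (prefix, remaining-length) states is grown one dimension at a time with a comprehension, then the two output lists are read off the final states.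
-- outside the precondition, e.g. on linear_cutting(3, [5, 0], [-1]): A returns ([], []), B returns ([], [])
import Mathlib
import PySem

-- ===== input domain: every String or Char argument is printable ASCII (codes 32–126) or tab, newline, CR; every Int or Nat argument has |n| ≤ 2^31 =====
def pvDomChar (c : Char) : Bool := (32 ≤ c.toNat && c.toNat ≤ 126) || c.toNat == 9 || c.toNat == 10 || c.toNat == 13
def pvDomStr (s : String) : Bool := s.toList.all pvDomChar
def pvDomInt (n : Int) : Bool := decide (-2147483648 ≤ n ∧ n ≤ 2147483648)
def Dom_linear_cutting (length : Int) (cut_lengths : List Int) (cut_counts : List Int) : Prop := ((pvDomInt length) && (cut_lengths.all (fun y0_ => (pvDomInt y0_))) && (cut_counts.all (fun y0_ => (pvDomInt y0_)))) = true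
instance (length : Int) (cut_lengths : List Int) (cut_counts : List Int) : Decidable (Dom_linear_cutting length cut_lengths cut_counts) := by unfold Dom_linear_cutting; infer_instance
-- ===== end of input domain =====

-- ===== PORT A =====
-- B differs from A by decomposition (level-wise state expansion instead of recursion), same cost.
-- Port of A's recursive generate_cuts; the Python appends into shared result/remainders lists,
-- rendered here as a pure pair accumulator appended in the same order.
-- ccs.headD 0: cut_counts[0]; the default 0 is only reached where Python raises IndexError (outside Pre_).
def pvGen (cls : List Int) (length : Int) (ccs cur : List Int) : List (List Int) × List Int :=
  match cls with
  | [] => ([cur ++ ccs], [length])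
  | L :: cls' =>
      (PySem.List.pyRange 0 (min (PySem.Int.floordiv length L) (ccs.headD 0) + 1) 1).foldl
        (fun acc i =>
          let r := pvGen cls' (length - i * L) ccs.tail (cur ++ [i])
          (acc.1 ++ r.1, acc.2 ++ r.2)) ([], [])

def linear_cutting (length : Int) (cut_lengths : List Int) (cut_counts : List Int) : List (List Int) × List Int :=
  pvGen cut_lengths length cut_counts []

-- ===== PORT B =====
-- one level of expansion: the inner comprehension of Source B
def pvStep (sts : List (List Int × Int)) (Lc : Int × Int) : List (List Int × Int) :=
  sts.flatMap (fun pr =>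
    (PySem.List.pyRange 0 (min (PySem.Int.floordiv pr.2 Lc.1) Lc.2 + 1) 1).map
      (fun i => (pr.1 ++ [i], pr.2 - i * Lc.1)))

def linear_cutting_alt (length : Int) (cut_lengths : List Int) (cut_counts : List Int) : List (List Int) × List Int :=
  let states := (List.zip cut_lengths cut_counts).foldl pvStep [([], length)]
  let tail := cut_counts.drop cut_lengths.length   -- cut_counts[len(cut_lengths):] (nonneg index: = drop)
  (states.map (fun pr => pr.1 ++ tail), states.map (fun pr => pr.2))

-- ===== PRECONDITION & SPEC =====
-- Pre_ excludes zero cut lengths (ZeroDivisionError in A) and cut_counts shorter than cut_lengths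
-- (IndexError in A); on the rare such inputs where earlier pruning empties the search before the
-- faulty position is reached, A still returns ([], []) — Pre_ is narrower than A's exact domain there.
def Pre_linear_cutting (length : Int) (cut_lengths : List Int) (cut_counts : List Int) : Prop :=
  (0 : Int) ∉ cut_lengths ∧ cut_lengths.length ≤ cut_counts.length
instance (length : Int) (cut_lengths : List Int) (cut_counts : List Int) : Decidable (Pre_linear_cutting length cut_lengths cut_counts) := by unfold Pre_linear_cutting; infer_instance
def pvWitness_linear_cutting : Int × List Int × List Int := (10, [2, 3], [3, 1])

def Spec_linear_cutting (length : Int) (cut_lengths : List Int) (cut_counts : List Int) (out : List (List Int) × List Int) : Prop := out = linear_cutting_alt length cut_lengths cut_counts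
instance (length : Int) (cut_lengths : List Int) (cut_counts : List Int) (out : List (List Int) × List Int) : Decidable (Spec_linear_cutting length cut_lengths cut_counts out) := by unfold Spec_linear_cutting; infer_instance

-- ===== CLAIM (what is proved, stated in full; the proofs are below) =====
def Claim_equal_linear_cutting : Prop := ∀ (length : Int) (cut_lengths : List Int) (cut_counts : List Int), Dom_linear_cutting length cut_lengths cut_counts → Pre_linear_cutting length cut_lengths cut_counts → Spec_linear_cutting length cut_lengths cut_counts (linear_cutting length cut_lengths cut_counts)

-- ===== LEMMAS AND PROOFS =====
theorem pvStep_flatMap (sts : List (List Int × Int)) (lc : Int × Int) :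
    pvStep sts lc = sts.flatMap (fun s => pvStep [s] lc) := by
  simp [pvStep]

theorem foldl_pvStep_flatMap (lcs : List (Int × Int)) (sts : List (List Int × Int)) :
    List.foldl pvStep sts lcs = sts.flatMap (fun s => List.foldl pvStep [s] lcs) := by
  induction lcs generalizing sts with
  | nil => simp
  | cons lc lcs ih =>
      simp only [List.foldl_cons]
      rw [ih (pvStep sts lc), pvStep_flatMap, List.flatMap_assoc]
      exact (List.flatMap_congr (fun s _ => by rw [ih (pvStep [s] lc)])).symm

theorem foldl_pair_append (f : Int → List (List Int) × List Int) (xs : List Int)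
    (a : List (List Int)) (b : List Int) :
    xs.foldl (fun acc i => (acc.1 ++ (f i).1, acc.2 ++ (f i).2)) (a, b)
      = (a ++ xs.flatMap (fun i => (f i).1), b ++ xs.flatMap (fun i => (f i).2)) := by
  induction xs generalizing a b with
  | nil => simp
  | cons x xs ih => simp [ih]

theorem pvGen_eq_states (cls : List Int) (ccs : List Int) (length : Int) (cur : List Int)
    (h : cls.length ≤ ccs.length) :
    pvGen cls length ccs cur
      = (((List.zip cls ccs).foldl pvStep [(cur, length)]).map
            (fun pr => pr.1 ++ ccs.drop cls.length),
         ((List.zip cls ccs).foldl pvStep [(cur, length)]).map (fun pr => pr.2)) := by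
  induction cls generalizing ccs length cur with
  | nil => simp [pvGen]
  | cons L cls' ih =>
      match ccs with
      | [] => simp at h
      | c :: ccs' =>
        simp only [List.length_cons, Nat.add_le_add_iff_right] at h
        rw [pvGen]
        simp only [List.headD_cons, List.tail_cons]
        rw [foldl_pair_append (fun i => pvGen cls' (length - i * L) ccs' (cur ++ [i]))]
        have hstep : pvStep [(cur, length)] (L, c)
            = (PySem.List.pyRange 0 (min (PySem.Int.floordiv length L) c + 1) 1).map
                (fun i => (cur ++ [i], length - i * L)) := by
          rw [pvStep]
          simp only [List.flatMap_cons, List.flatMap_nil, List.append_nil]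
        simp only [List.zip_cons_cons, List.foldl_cons, hstep]
        rw [foldl_pvStep_flatMap]
        simp only [List.flatMap_map, List.length_cons, List.drop_succ_cons,
          List.nil_append, List.map_flatMap]
        refine congrArg₂ Prod.mk ?_ ?_ <;>
          · refine List.flatMap_congr (fun i _ => ?_)
            rw [ih ccs' (length - i * L) (cur ++ [i]) h]

-- ===== VERDICT (by name: the statement is the Claim_ definition above) =====
theorem linear_cutting_spec : Claim_equal_linear_cutting := by
  intro length cls ccs _ hpre
  unfold Spec_linear_cutting linear_cutting linear_cutting_alt
  exact pvGen_eq_states cls ccs length [] hpre.2
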